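-- pv_equiv track=rewrite | github.com/dynamics-research-group/agnetwork | backtracking.py | compatibleHeuristic
-- ===== SOURCE A (Python) =====
-- def compatibleHeuristic(Nv1, Nv2, m):
--     # My best guess as to the heuristic in the paper by Cao
--     # Enforces induced subgraphs
--     S1 = set()
--     S2 = set()
--     for pair in m:
--         if pair[0] in Nv1:
--             S1.add(pair)
--         if pair[1] in Nv2:
--             S2.add(pair)
--     if len(S1) == len(S2):
--         if S1 == S2:
--             return True
--     return False
-- ===== SOURCE B (Python) =====
-- def compatibleHeuristic(Nv1, Nv2, m):
--     # Single-pass predicate: the two sets agree iff every pair's memberships agree.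
--     return all((pair[0] in Nv1) == (pair[1] in Nv2) for pair in m)
-- ===== Notes on version B (the rewrite author's own statement) =====
-- stated objective: simpler
-- what changed: Replaces building and comparing two sets with a single all() pass checking (pair[0] in Nv1) == (pair[1] in Nv2) for each pair, maintaining no collections.
import Mathlib
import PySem

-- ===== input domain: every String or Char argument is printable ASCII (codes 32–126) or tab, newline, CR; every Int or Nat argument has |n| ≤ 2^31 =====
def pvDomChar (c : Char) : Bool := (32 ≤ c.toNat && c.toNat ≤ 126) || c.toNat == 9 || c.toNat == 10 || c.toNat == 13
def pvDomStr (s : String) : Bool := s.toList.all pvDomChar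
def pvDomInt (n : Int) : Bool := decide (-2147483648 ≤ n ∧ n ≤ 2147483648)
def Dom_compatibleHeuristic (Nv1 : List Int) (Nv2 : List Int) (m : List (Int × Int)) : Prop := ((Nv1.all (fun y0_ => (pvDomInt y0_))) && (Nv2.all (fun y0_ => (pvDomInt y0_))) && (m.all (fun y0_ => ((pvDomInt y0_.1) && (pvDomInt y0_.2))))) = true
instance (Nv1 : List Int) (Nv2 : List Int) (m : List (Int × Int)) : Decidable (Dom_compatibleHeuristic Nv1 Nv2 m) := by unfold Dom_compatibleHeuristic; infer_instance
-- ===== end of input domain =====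

-- B replaces the two-set build-and-compare with one all() pass over m (simpler; same cost).

-- ===== PORT A =====
-- A's loop body: conditionally add the pair to S1 and to S2.
def chStep (Nv1 Nv2 : List Int) (st : PySem.Set (Int × Int) × PySem.Set (Int × Int))
    (pair : Int × Int) : PySem.Set (Int × Int) × PySem.Set (Int × Int) :=
  (if pair.1 ∈ Nv1 then PySem.Set.add st.1 pair else st.1,
   if pair.2 ∈ Nv2 then PySem.Set.add st.2 pair else st.2)

def compatibleHeuristic (Nv1 : List Int) (Nv2 : List Int) (m : List (Int × Int)) : Bool :=
  let st := m.foldl (chStep Nv1 Nv2) (PySem.Set.empty, PySem.Set.empty)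
  if PySem.Set.len st.1 = PySem.Set.len st.2 then
    if PySem.Set.equal st.1 st.2 then true else false
  else false

-- ===== PORT B =====
def compatibleHeuristic_alt (Nv1 : List Int) (Nv2 : List Int) (m : List (Int × Int)) : Bool :=
  m.all (fun pair => decide (pair.1 ∈ Nv1) = decide (pair.2 ∈ Nv2))

-- ===== PRECONDITION & SPEC =====
def Spec_compatibleHeuristic (Nv1 : List Int) (Nv2 : List Int) (m : List (Int × Int)) (out : Bool) : Prop := out = compatibleHeuristic_alt Nv1 Nv2 m
instance (Nv1 : List Int) (Nv2 : List Int) (m : List (Int × Int)) (out : Bool) : Decidable (Spec_compatibleHeuristic Nv1 Nv2 m out) := by unfold Spec_compatibleHeuristic; infer_instance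

-- ===== CLAIM (what is proved, stated in full; the proofs are below) =====
def Claim_equal_compatibleHeuristic : Prop := ∀ (Nv1 : List Int) (Nv2 : List Int) (m : List (Int × Int)), Dom_compatibleHeuristic Nv1 Nv2 m → Spec_compatibleHeuristic Nv1 Nv2 m (compatibleHeuristic Nv1 Nv2 m)

-- ===== LEMMAS AND PROOFS =====

-- Characterisation of A's loop state: membership and nodup of each component.
theorem chFold_mem_nodup (Nv1 Nv2 : List Int) (m : List (Int × Int))
    (s1 s2 : PySem.Set (Int × Int)) (h1 : s1.Nodup) (h2 : s2.Nodup) :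
    (m.foldl (chStep Nv1 Nv2) (s1, s2)).1.Nodup ∧
    (m.foldl (chStep Nv1 Nv2) (s1, s2)).2.Nodup ∧
    (∀ x, x ∈ (m.foldl (chStep Nv1 Nv2) (s1, s2)).1 ↔ x ∈ s1 ∨ (x ∈ m ∧ x.1 ∈ Nv1)) ∧
    (∀ x, x ∈ (m.foldl (chStep Nv1 Nv2) (s1, s2)).2 ↔ x ∈ s2 ∨ (x ∈ m ∧ x.2 ∈ Nv2)) := by
  induction m generalizing s1 s2 with
  | nil => simp [h1, h2]
  | cons p rest ih =>
    simp only [List.foldl_cons]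
    have h1' : (chStep Nv1 Nv2 (s1, s2) p).1.Nodup := by
      simp only [chStep]
      split
      · exact PySem.Set.nodup_add _ _ h1
      · exact h1
    have h2' : (chStep Nv1 Nv2 (s1, s2) p).2.Nodup := by
      simp only [chStep]
      split
      · exact PySem.Set.nodup_add _ _ h2
      · exact h2
    obtain ⟨n1, n2, m1, m2⟩ := ih (chStep Nv1 Nv2 (s1, s2) p).1 (chStep Nv1 Nv2 (s1, s2) p).2 h1' h2'
    refine ⟨n1, n2, ?_, ?_⟩
    · intro x
      rw [m1 x]
      simp only [chStep]
      by_cases hp : p.1 ∈ Nv1 <;> simp [hp, PySem.Set.mem_add] <;> constructor <;>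
        rintro h <;> aesop
    · intro x
      rw [m2 x]
      simp only [chStep]
      by_cases hp : p.2 ∈ Nv2 <;> simp [hp, PySem.Set.mem_add] <;> constructor <;>
        rintro h <;> aesop

-- ===== VERDICT (by name: the statement is the Claim_ definition above) =====
theorem compatibleHeuristic_spec : Claim_equal_compatibleHeuristic := by
  intro Nv1 Nv2 m _
  unfold Spec_compatibleHeuristic compatibleHeuristic compatibleHeuristic_alt
  obtain ⟨n1, n2, m1, m2⟩ :=
    chFold_mem_nodup Nv1 Nv2 m PySem.Set.empty PySem.Set.empty List.nodup_nil List.nodup_nil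
  set st := m.foldl (chStep Nv1 Nv2) (PySem.Set.empty, PySem.Set.empty) with hst
  simp only [PySem.Set.empty, List.not_mem_nil, false_or] at m1 m2
  by_cases hb : ∀ p ∈ m, (decide (p.1 ∈ Nv1) = decide (p.2 ∈ Nv2))
  · -- B is true: the two sets have the same members, hence same length, hence A true
    have hsame : ∀ x, x ∈ st.1 ↔ x ∈ st.2 := by
      intro x
      rw [m1 x, m2 x]
      constructor <;> rintro ⟨hm, hmem⟩ <;> refine ⟨hm, ?_⟩ <;>
        have := hb x hm <;> simp_all
    have hperm : st.1.Perm st.2 := (List.perm_ext_iff_of_nodup n1 n2).2 hsame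
    have hlen : PySem.Set.len st.1 = PySem.Set.len st.2 := by
      simp [PySem.Set.len, hperm.length_eq]
    have heq : PySem.Set.equal st.1 st.2 = true := (PySem.Set.equal_iff st.1 st.2).2 hsame
    simp [heq, hperm.length_eq, List.all_eq_true]
    intro a b hab
    simpa using hb (a, b) hab
  · -- B is false: some pair breaks membership agreement, so the sets differ
    rw [not_forall] at hb
    simp only [not_forall, exists_prop] at hb
    obtain ⟨p, hp, hne⟩ := hb
    have hdiff : ¬ (∀ x, x ∈ st.1 ↔ x ∈ st.2) := by
      intro hall
      have := hall p
      rw [m1 p, m2 p] at this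
      by_cases h1 : p.1 ∈ Nv1 <;> by_cases h2 : p.2 ∈ Nv2 <;> simp_all
    have heq : PySem.Set.equal st.1 st.2 = false := by
      rcases h : PySem.Set.equal st.1 st.2 with _ | _
      · rfl
      · exact absurd ((PySem.Set.equal_iff st.1 st.2).1 h) hdiff
    have hB : m.all (fun pair => decide (decide (pair.1 ∈ Nv1) = decide (pair.2 ∈ Nv2))) = false := by
      simp only [List.all_eq_false]
      exact ⟨p, hp, by simp [hne]⟩
    simp only [hB]
    split
    · simp [heq]
    · rfl
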